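-- pv_equiv track=rewrite | github.com/mvskalyan1809/python_course_work | ass-3.py | calculate_reply_ratio
-- ===== SOURCE A (Python) =====
-- def calculate_reply_ratio(messages, user1, user2):
--     reply_count = 0
--     prev_user = None
--     for msg in messages:
--         current_user = msg.split(':')[0].strip()
--         if prev_user == user1 and current_user == user2:
--             reply_count += 1
--         prev_user = current_user
--     return reply_count
-- ===== SOURCE B (Python) =====
-- def calculate_reply_ratio(messages, user1, user2):
--     senders = [m.split(':')[0].strip() for m in messages]
--     pair_counts = {}
--     for p in zip(senders, senders[1:]):
--         pair_counts[p] = pair_counts.get(p, 0) + 1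
--     return pair_counts.get((user1, user2), 0)
-- ===== Notes on version B (the rewrite author's own statement) =====
-- stated objective: alternative
-- what changed: Instead of scanning with a prev_user accumulator testing the one target pair, B builds a dictionary histogram of ALL adjacent sender pairs and answers with a single lookup of (user1, user2).
import Mathlib
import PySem

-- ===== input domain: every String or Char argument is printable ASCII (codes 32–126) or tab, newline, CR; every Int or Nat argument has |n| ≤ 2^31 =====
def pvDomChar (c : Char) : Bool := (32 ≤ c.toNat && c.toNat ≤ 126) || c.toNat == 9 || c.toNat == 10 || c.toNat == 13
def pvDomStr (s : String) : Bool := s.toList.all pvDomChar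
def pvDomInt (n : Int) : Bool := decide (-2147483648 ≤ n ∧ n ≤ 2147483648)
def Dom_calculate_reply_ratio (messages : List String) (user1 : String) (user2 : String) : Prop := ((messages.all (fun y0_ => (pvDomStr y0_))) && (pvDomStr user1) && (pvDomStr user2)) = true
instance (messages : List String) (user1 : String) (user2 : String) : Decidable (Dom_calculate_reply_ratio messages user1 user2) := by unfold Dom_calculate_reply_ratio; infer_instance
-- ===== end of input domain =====

-- B replaces the targeted prev_user scan with a histogram of all adjacent sender pairs plus one dictionary lookup; objective: alternative, not faster.

-- shared helper: sender of a message = msg.split(':')[0].strip()  (sep ':' nonempty, so split? is some and the list nonempty)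
def pvSender (m : String) : String := PySem.Str.strip (((PySem.Str.split? m ":").getD []).headD "")

-- ===== PORT A =====
-- A: single pass, state = (prev_user, reply_count); 'prev_user == user1' is False while prev_user is None.
def calculate_reply_ratio (messages : List String) (user1 : String) (user2 : String) : Int :=
  (messages.foldl
    (fun (st : Option String × Int) msg =>
      (some (pvSender msg),
        if st.1 == some user1 && pvSender msg == user2 then st.2 + 1 else st.2))
    (none, 0)).2

-- ===== PORT B =====
-- B: senders = [m.split(':')[0].strip() for m in messages]; pair_counts[p] = pair_counts.get(p,0)+1
--    over zip(senders, senders[1:]); return pair_counts.get((user1, user2), 0).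
def calculate_reply_ratio_alt (messages : List String) (user1 : String) (user2 : String) : Int :=
  let senders := messages.map pvSender
  let pair_counts : PySem.Dict (String × String) Int :=
    (senders.zip (senders.drop 1)).foldl
      (fun d p => d.insert p (d.getD p 0 + 1)) PySem.Dict.empty
  pair_counts.getD (user1, user2) 0

-- ===== PRECONDITION & SPEC =====
def Spec_calculate_reply_ratio (messages : List String) (user1 : String) (user2 : String) (out : Int) : Prop := out = calculate_reply_ratio_alt messages user1 user2
instance (messages : List String) (user1 : String) (user2 : String) (out : Int) : Decidable (Spec_calculate_reply_ratio messages user1 user2 out) := by unfold Spec_calculate_reply_ratio; infer_instance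

-- ===== CLAIM =====
def Claim_equal_calculate_reply_ratio : Prop := ∀ (messages : List String) (user1 : String) (user2 : String), Dom_calculate_reply_ratio messages user1 user2 → Spec_calculate_reply_ratio messages user1 user2 (calculate_reply_ratio messages user1 user2)

-- ===== LEMMAS AND PROOFS =====

-- A's loop from state (some u, c): adds the count of (user1,user2) among adjacent pairs of u :: senders.
lemma pvLoop_some (user1 user2 : String) (msgs : List String) (u : String) (c : Int) :
    (msgs.foldl
      (fun (st : Option String × Int) msg =>
        (some (pvSender msg),
          if st.1 == some user1 && pvSender msg == user2 then st.2 + 1 else st.2))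
      (some u, c)).2
      = c + (((u :: msgs.map pvSender).zip (msgs.map pvSender)).count (user1, user2) : Int) := by
  induction msgs generalizing u c with
  | nil => simp
  | cons m t ih =>
    simp only [List.foldl_cons, List.map_cons, List.zip_cons_cons, List.count_cons]
    rw [ih]
    have hb : ((some u == some user1 : Bool)) = (u == user1) := by simp
    rw [hb]
    rw [show ((u, pvSender m) == (user1, user2)) = (u == user1 && pvSender m == user2) from rfl]
    by_cases h : (u == user1 && pvSender m == user2) = true
    · rw [if_pos h]; simp only [h, if_true]; push_cast; ring
    · rw [if_neg h]; simp only [h, if_false]; push_cast; ring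

lemma pvLoop_none (user1 user2 : String) (msgs : List String) :
    (msgs.foldl
      (fun (st : Option String × Int) msg =>
        (some (pvSender msg),
          if st.1 == some user1 && pvSender msg == user2 then st.2 + 1 else st.2))
      (none, 0)).2
      = (((msgs.map pvSender).zip ((msgs.map pvSender).drop 1)).count (user1, user2) : Int) := by
  cases msgs with
  | nil => simp
  | cons m t =>
    simp only [List.foldl_cons, List.map_cons, List.drop_succ_cons, List.drop_zero]
    rw [show ((none : Option String) == some user1 && pvSender m == user2) = false by simp,
      if_neg (by simp : ¬(false = true))]
    rw [pvLoop_some user1 user2 t (pvSender m) 0]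
    ring

-- ===== VERDICT =====
theorem calculate_reply_ratio_spec : Claim_equal_calculate_reply_ratio := by
  intro messages user1 user2 _
  show calculate_reply_ratio messages user1 user2 = calculate_reply_ratio_alt messages user1 user2
  rw [calculate_reply_ratio, calculate_reply_ratio_alt, pvLoop_none]
  simp [PySem.Dict.getD_foldl_insert_add_one]
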